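-- pv_equiv track=rewrite | github.com/hbaktash/NLP_course_project | english_preprocessing.py | tokens_with_tf
-- ===== SOURCE A (Python) =====
-- def tokens_with_tf(tokens: list):
--     positions_dict = {}
--     term_frequencies = []
--     i = 0
--     for token in tokens:
--         if token in positions_dict:
--             tf_pair = term_frequencies[positions_dict[token]]
--             term_frequencies[positions_dict[token]] = (tf_pair[0], tf_pair[1] + 1)
--         else:
--             positions_dict[token] = i
--             i += 1
--             term_frequencies.append((token, 1))
--     return term_frequencies
-- ===== SOURCE B (Python) =====
-- def tokens_with_tf(tokens: list):
--     return [(t, tokens.count(t)) for t in dict.fromkeys(tokens)]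
-- ===== Notes on version B (the rewrite author's own statement) =====
-- stated objective: simpler
-- what changed: Replaces A's single-pass accumulator (dict of positions plus indexed in-place tuple rebuild) with a two-stage algorithm that keeps no running counts: deduplicate once to get first-appearance order, then count each distinct token by a separate scan of the list.
import Mathlib
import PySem

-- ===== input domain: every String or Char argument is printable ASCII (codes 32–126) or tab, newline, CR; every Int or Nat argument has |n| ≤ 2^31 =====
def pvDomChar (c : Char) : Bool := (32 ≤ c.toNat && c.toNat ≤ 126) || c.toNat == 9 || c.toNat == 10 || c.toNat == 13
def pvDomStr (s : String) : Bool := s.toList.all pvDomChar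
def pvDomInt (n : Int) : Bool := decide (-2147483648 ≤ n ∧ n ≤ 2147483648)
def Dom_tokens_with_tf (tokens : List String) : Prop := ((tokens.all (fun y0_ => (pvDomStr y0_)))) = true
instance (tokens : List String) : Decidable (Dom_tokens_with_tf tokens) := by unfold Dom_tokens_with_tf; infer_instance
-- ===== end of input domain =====

-- B replaces A's single-pass accumulator (dict of positions + in-place tuple rebuild) by a two-stage
-- algorithm with no running counts: dedup to first-appearance order, then count each distinct token
-- by a separate scan (objective: simpler).

-- ===== PORT A =====
-- loop body of A: state = (positions_dict, term_frequencies, i)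
def tokensWithTfStepA (s : PySem.Dict String Int × List (String × Int) × Int)
    (token : String) : PySem.Dict String Int × List (String × Int) × Int :=
  let pos := s.1
  let tf := s.2.1
  let i := s.2.2
  if pos.contains token then
    -- tf_pair = term_frequencies[positions_dict[token]]; in-range by the loop's invariant,
    -- so pyGetD/pySetD with a default are exact here
    let j := pos.getD token 0
    let pair := PySem.List.pyGetD tf j ("", 0)
    (pos, PySem.List.pySetD tf j (pair.1, pair.2 + 1), i)
  else
    (pos.insert token i, tf ++ [(token, 1)], i + 1)

def tokens_with_tf (tokens : List String) : List (String × Int) :=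
  (tokens.foldl tokensWithTfStepA (PySem.Dict.empty, [], 0)).2.1

-- ===== PORT B =====
-- [(t, tokens.count(t)) for t in dict.fromkeys(tokens)]
def tokens_with_tf_alt (tokens : List String) : List (String × Int) :=
  (PySem.List.dedup tokens).map (fun t => (t, (PySem.List.count tokens t : Int)))

-- ===== PRECONDITION & SPEC =====
def Spec_tokens_with_tf (tokens : List String) (out : List (String × Int)) : Prop := out = tokens_with_tf_alt tokens
instance (tokens : List String) (out : List (String × Int)) : Decidable (Spec_tokens_with_tf tokens out) := by unfold Spec_tokens_with_tf; infer_instance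

-- ===== CLAIM (what is proved, stated in full; the proofs are below) =====
def Claim_equal_tokens_with_tf : Prop := ∀ (tokens : List String), Dom_tokens_with_tf tokens → Spec_tokens_with_tf tokens (tokens_with_tf tokens)

-- ===== LEMMAS AND PROOFS =====

-- A's positions_dict as a function of the token names seen so far (in first-appearance order)
def tfPosOf (names : List String) : PySem.Dict String Int :=
  PySem.Dict.mk (names.zipIdx.map fun q => (q.1, (q.2 : Int)))

theorem tfPosOf_contains (names : List String) (t : String) :
    (tfPosOf names).contains t = decide (t ∈ names) := by
  simp only [tfPosOf, PySem.Dict.contains_mk, List.any_map]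
  rcases h : decide (t ∈ names) with _ | _
  · simp only [decide_eq_false_iff_not] at h
    simp only [List.any_eq_false]
    rintro ⟨x, i⟩ hq
    obtain ⟨-, -, hx⟩ := List.mem_zipIdx hq
    simp only [Function.comp_apply]
    intro he
    have he' : x = t := by simpa using he
    exact h (by rw [← he', hx]; exact List.getElem_mem _)
  · simp only [decide_eq_true_eq] at h
    obtain ⟨j, hj, hx⟩ := List.mem_iff_getElem.mp h
    have hjz : j < names.zipIdx.length := by simpa using hj
    have hz : (names.zipIdx)[j] = (names[j], j) := by
      simp [List.getElem_zipIdx (l := names) (j := 0) (i := j) hjz]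
    exact List.any_eq_true.mpr ⟨(names[j], j), hz ▸ List.getElem_mem hjz, by simp [hx]⟩

theorem tfPosOf_keys (names : List String) : (tfPosOf names).keys = names := by
  simp only [tfPosOf, PySem.Dict.keys_mk, List.map_map]
  simp [Function.comp_def, List.zipIdx_map_fst 0 names]

theorem tfPosOf_keys_nodup (names : List String) (h : names.Nodup) :
    (tfPosOf names).keys.Nodup := by
  rw [tfPosOf_keys]; exact h

-- setting the slot of t (unique, by Nodup) equals the pointwise rewrite that Dict.insert performs
theorem tf_set_eq_map (tf : List (String × Int)) (j : Nat) (t : String) (w : Int)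
    (hnd : (tf.map Prod.fst).Nodup) (hj : j < tf.length) (ht : tf[j].1 = t) :
    tf.set j (t, w) = tf.map (fun p => if p.1 == t then (t, w) else p) := by
  induction tf generalizing j with
  | nil => simp at hj
  | cons p tf ih =>
    simp only [List.map_cons, List.nodup_cons] at hnd
    cases j with
    | zero =>
      simp only [List.getElem_cons_zero] at ht
      subst ht
      simp only [List.set_cons_zero, List.map_cons, beq_self_eq_true, if_pos]
      congr 1
      have hmap : tf.map (fun q => if q.1 == p.1 then (p.1, w) else q) = tf := by
        refine (List.map_congr_left (g := id) (fun q hq => ?_)).trans (List.map_id tf)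
        have : q.1 ≠ p.1 := fun he => hnd.1 (he ▸ List.mem_map_of_mem hq)
        simp [this]
      exact hmap.symm
    | succ j =>
      simp only [List.getElem_cons_succ] at ht
      have hj' : j < tf.length := by simpa using hj
      have hp : p.1 ≠ t := by
        intro he
        exact hnd.1 (he ▸ ht ▸ List.mem_map_of_mem (List.getElem_mem hj'))
      have hcond : (p.1 == t) = false := by simpa using hp
      simp only [List.set_cons_succ, List.map_cons, hcond, Bool.false_eq_true, if_false]
      rw [ih j hnd.2 hj' ht]

-- main loop invariant: A's state is determined by its tf list, and A's tf equals Counter(tokens)'s items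
theorem tf_loop_eq (tokens : List String) :
    ∀ (tf : List (String × Int)), (tf.map Prod.fst).Nodup →
    (tokens.foldl tokensWithTfStepA (tfPosOf (tf.map Prod.fst), tf, (tf.length : Int))).2.1
      = (tokens.foldl (fun counts token => counts.insert token (counts.getD token 0 + 1))
          (PySem.Dict.mk tf)).items := by
  induction tokens with
  | nil => intro tf _; rfl
  | cons token rest ih =>
    intro tf hnd
    by_cases hmem : token ∈ tf.map Prod.fst
    · -- repeat token: A updates tf in place at its recorded position; the counting dict overwrites in place
      obtain ⟨j, hj, hx⟩ := List.mem_iff_getElem.mp hmem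
      have hjlen : j < tf.length := by simpa using hj
      have ht : tf[j].1 = token := by
        have := hx; simpa [List.getElem_map] using this
      -- lookup in positions_dict
      have hjz : j < ((tf.map Prod.fst).zipIdx).length := by simpa using hj
      have hposin : ((tf.map Prod.fst).zipIdx)[j] = ((tf.map Prod.fst)[j], j) := by
        simp [List.getElem_zipIdx (l := tf.map Prod.fst) (j := 0) (i := j) hjz]
      have hmemz : (token, (j : Int)) ∈ (tfPosOf (tf.map Prod.fst)).items := by
        simp only [tfPosOf]
        refine List.mem_map.mpr ⟨((tf.map Prod.fst)[j], j), ?_, by simp [hx]⟩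
        exact hposin ▸ List.getElem_mem hjz
      have hgetpos : (tfPosOf (tf.map Prod.fst)).getD token 0 = (j : Int) :=
        PySem.Dict.getD_of_mem_items _ hmemz (tfPosOf_keys_nodup _ hnd) 0
      have hcontA : (tfPosOf (tf.map Prod.fst)).contains token = true := by
        rw [tfPosOf_contains]; simpa using hmem
      -- counting-dict side
      have hkeys : (PySem.Dict.mk tf).keys = tf.map Prod.fst := PySem.Dict.keys_mk tf
      have hpair : tf[j] = (token, tf[j].2) := Prod.ext ht rfl
      have hmemtf : (token, tf[j].2) ∈ (PySem.Dict.mk tf).items := by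
        show (token, tf[j].2) ∈ tf
        exact hpair ▸ List.getElem_mem hjlen
      have hcontB : (PySem.Dict.mk tf).contains token = true := by
        rw [PySem.Dict.contains_eq_decide_mem_keys, hkeys]
        simpa using hmem
      have hgetB : (PySem.Dict.mk tf).getD token 0 = tf[j].2 :=
        PySem.Dict.getD_of_mem_items _ hmemtf (hkeys ▸ hnd) 0
      -- the new tf list
      set w : Int := tf[j].2 + 1 with hw
      have hset : tf.set j (token, w) = tf.map (fun p => if p.1 == token then (token, w) else p) :=
        tf_set_eq_map tf j token w hnd hjlen ht
      have hnames : ((tf.set j (token, w)).map Prod.fst) = tf.map Prod.fst := by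
        rw [List.map_set]
        show (tf.map Prod.fst).set j token = tf.map Prod.fst
        rw [← hx]
        exact List.set_getElem_self hj
      have hstepA : tokensWithTfStepA (tfPosOf (tf.map Prod.fst), tf, (tf.length : Int)) token
          = (tfPosOf (tf.map Prod.fst), tf.set j (token, w), (tf.length : Int)) := by
        simp only [tokensWithTfStepA, hcontA, if_pos, hgetpos,
          PySem.List.pyGetD_natCast, PySem.List.pySetD_natCast]
        rw [List.getD_eq_getElem tf _ hjlen, ht]
      have hstepB : (PySem.Dict.mk tf).insert token ((PySem.Dict.mk tf).getD token 0 + 1)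
          = PySem.Dict.mk (tf.set j (token, w)) := by
        apply PySem.Dict.ext
        rw [PySem.Dict.items_insert_of_contains _ _ hcontB, hgetB, hset]
      simp only [List.foldl_cons, hstepA, hstepB]
      have := ih (tf.set j (token, w)) (hnames ▸ hnd)
      rw [hnames, List.length_set] at this
      exact this
    · -- fresh token: A appends (token, 1) and records its position; the counting dict appends (token, 1)
      have hcontA : (tfPosOf (tf.map Prod.fst)).contains token = false := by
        rw [tfPosOf_contains]; simpa using hmem
      have hkeys : (PySem.Dict.mk tf).keys = tf.map Prod.fst := PySem.Dict.keys_mk tf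
      have hcontB : (PySem.Dict.mk tf).contains token = false := by
        rw [PySem.Dict.contains_eq_decide_mem_keys, hkeys]
        simpa using hmem
      have hstepA : tokensWithTfStepA (tfPosOf (tf.map Prod.fst), tf, (tf.length : Int)) token
          = ((tfPosOf (tf.map Prod.fst)).insert token (tf.length : Int),
             tf ++ [(token, 1)], (tf.length : Int) + 1) := by
        simp only [tokensWithTfStepA, hcontA, Bool.false_eq_true, if_neg, not_false_iff]
      have hposins : (tfPosOf (tf.map Prod.fst)).insert token (tf.length : Int)
          = tfPosOf ((tf ++ [(token, 1)]).map Prod.fst) := by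
        apply PySem.Dict.ext
        rw [PySem.Dict.items_insert_of_not_contains _ _ hcontA]
        simp [tfPosOf, List.zipIdx_append]
      have hstepB : (PySem.Dict.mk tf).insert token ((PySem.Dict.mk tf).getD token 0 + 1)
          = PySem.Dict.mk (tf ++ [(token, 1)]) := by
        apply PySem.Dict.ext
        rw [PySem.Dict.getD_of_not_contains _ _ hcontB,
          PySem.Dict.items_insert_of_not_contains _ _ hcontB]
        norm_num
      have hnd' : ((tf ++ [(token, 1)]).map Prod.fst).Nodup := by
        simp only [List.map_append, List.map_cons, List.map_nil]
        exact List.Nodup.append hnd (List.nodup_singleton _)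
          (by simpa [List.disjoint_singleton] using hmem)
      simp only [List.foldl_cons, hstepA, hstepB, hposins]
      have := ih (tf ++ [(token, 1)]) hnd'
      have hlen : ((tf ++ [(token, 1)]).length : Int) = (tf.length : Int) + 1 := by
        simp
      rw [hlen] at this
      exact this

-- ===== VERDICT (by name: the statement is the Claim_ definition above) =====
theorem tokens_with_tf_spec : Claim_equal_tokens_with_tf := by
  intro tokens _
  unfold Spec_tokens_with_tf tokens_with_tf tokens_with_tf_alt
  have h := tf_loop_eq tokens [] (by simp)
  simp only [tfPosOf, List.map_nil, List.zipIdx_nil, List.length_nil, Nat.cast_zero] at h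
  rw [show PySem.Dict.mk ([] : List (String × Int)) = PySem.Dict.empty from rfl] at h
  rw [h, PySem.Dict.foldl_insert_getD_add_one_eq_counter, PySem.Dict.items_counter,
    PySem.List.dedup_eq_ofList]
  simp [PySem.List.count_eq]
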